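-- pv_equiv track=rewrite | github.com/casual-brothers/pawpatroldinoworld | modificar_po.py | replace_msgid_msgstr
-- ===== SOURCE A (Python) =====
-- def replace_msgid_msgstr(entry_lines, new_msgid, new_msgstr):
--     result = []
--     mode = None
--     for line in entry_lines:
--         if line.startswith("msgid"):
--             result.extend(new_msgid)
--             mode = "msgid"
--         elif line.startswith("msgstr"):
--             result.extend(new_msgstr)
--             mode = "msgstr"
--         elif mode in ["msgid", "msgstr"] and line.startswith("\""):
--             continue
--         else:
--             result.append(line)
--             mode = None
--     return result
-- ===== SOURCE B (Python) =====
-- def replace_msgid_msgstr(entry_lines, new_msgid, new_msgstr):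
--     # Right-to-left pass: collect continuation lines in a pending buffer until
--     # their block head is seen, emitting one chunk per block, then flatten.
--     chunks = []
--     pending = []
--     for line in reversed(entry_lines):
--         if line.startswith('"'):
--             pending.append(line)
--         elif line.startswith("msgid"):
--             chunks.append(new_msgid)
--             pending = []
--         elif line.startswith("msgstr"):
--             chunks.append(new_msgstr)
--             pending = []
--         else:
--             pending.append(line)
--             chunks.append(pending[::-1])
--             pending = []
--     chunks.append(pending[::-1])
--     return [x for chunk in reversed(chunks) for x in chunk]
-- ===== Notes on version B (the rewrite author's own statement) =====
-- stated objective: alternative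
-- what changed: B traverses the lines right-to-left, buffering continuation lines in a pending list until their block head is reached (a header discards the buffer, any other line keeps it as its chunk), collecting one chunk per block and flattening the reversed chunk list, instead of A's forward pass with a cross-iteration mode flag.
import Mathlib
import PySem

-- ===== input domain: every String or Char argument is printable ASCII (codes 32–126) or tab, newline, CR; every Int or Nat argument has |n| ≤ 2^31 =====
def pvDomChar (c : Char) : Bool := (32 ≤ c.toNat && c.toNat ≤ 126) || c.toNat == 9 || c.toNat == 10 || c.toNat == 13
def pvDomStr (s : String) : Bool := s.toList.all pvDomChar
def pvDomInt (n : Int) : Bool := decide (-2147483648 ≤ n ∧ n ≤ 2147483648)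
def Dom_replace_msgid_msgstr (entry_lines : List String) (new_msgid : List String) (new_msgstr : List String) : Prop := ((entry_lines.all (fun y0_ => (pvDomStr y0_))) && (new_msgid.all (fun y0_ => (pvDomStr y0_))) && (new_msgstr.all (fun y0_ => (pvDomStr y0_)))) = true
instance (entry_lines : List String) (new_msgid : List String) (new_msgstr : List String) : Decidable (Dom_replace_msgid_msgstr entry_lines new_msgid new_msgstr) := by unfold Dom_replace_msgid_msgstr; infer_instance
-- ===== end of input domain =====

-- B scans the lines RIGHT-TO-LEFT, buffering continuation lines until their block
-- head appears and emitting one chunk per block, then flattens the reversed chunk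
-- list — an alternative decomposition of the same-cost task (return value only).

-- ===== PORT A =====
-- the for-loop body of A, state = (result, mode)
def pvLoopA (new_msgid new_msgstr : List String) (xs : List String)
    (result : List String) (mode : Option String) : List String :=
  match xs with
  | [] => result
  | line :: rest =>
    if PySem.Str.startswith line "msgid" then
      pvLoopA new_msgid new_msgstr rest (result ++ new_msgid) (some "msgid")
    else if PySem.Str.startswith line "msgstr" then
      pvLoopA new_msgid new_msgstr rest (result ++ new_msgstr) (some "msgstr")
    else if (mode = some "msgid" ∨ mode = some "msgstr") ∧ PySem.Str.startswith line "\"" then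
      pvLoopA new_msgid new_msgstr rest result mode
    else
      pvLoopA new_msgid new_msgstr rest (result ++ [line]) none

def replace_msgid_msgstr (entry_lines : List String) (new_msgid : List String) (new_msgstr : List String) : List String :=
  pvLoopA new_msgid new_msgstr entry_lines [] none

-- ===== PORT B =====
-- the body of B's `for line in reversed(entry_lines)` loop, state = (chunks, pending)
def pvStepB (new_msgid new_msgstr : List String)
    (st : List (List String) × List String) (line : String) :
    List (List String) × List String :=
  if PySem.Str.startswith line "\"" then
    (st.1, st.2 ++ [line])
  else if PySem.Str.startswith line "msgid" then
    (st.1 ++ [new_msgid], [])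
  else if PySem.Str.startswith line "msgstr" then
    (st.1 ++ [new_msgstr], [])
  else
    (st.1 ++ [(st.2 ++ [line]).reverse], [])

def replace_msgid_msgstr_alt (entry_lines : List String) (new_msgid : List String) (new_msgstr : List String) : List String :=
  let st := entry_lines.reverse.foldl (pvStepB new_msgid new_msgstr) ([], [])
  -- chunks.append(pending[::-1]); flatten of reversed(chunks)
  ((st.1 ++ [st.2.reverse]).reverse).flatten

-- ===== PRECONDITION & SPEC =====
def Spec_replace_msgid_msgstr (entry_lines : List String) (new_msgid : List String) (new_msgstr : List String) (out : List String) : Prop := out = replace_msgid_msgstr_alt entry_lines new_msgid new_msgstr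
instance (entry_lines : List String) (new_msgid : List String) (new_msgstr : List String) (out : List String) : Decidable (Spec_replace_msgid_msgstr entry_lines new_msgid new_msgstr out) := by unfold Spec_replace_msgid_msgstr; infer_instance

-- ===== CLAIM (what is proved, stated in full; the proofs are below) =====
def Claim_equal_replace_msgid_msgstr : Prop := ∀ (entry_lines : List String) (new_msgid : List String) (new_msgstr : List String), Dom_replace_msgid_msgstr entry_lines new_msgid new_msgstr → Spec_replace_msgid_msgstr entry_lines new_msgid new_msgstr (replace_msgid_msgstr entry_lines new_msgid new_msgstr)

-- ===== LEMMAS AND PROOFS =====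

-- B's loop state after processing the suffix xs (the reversed scan reaches xs last)
def pvBS (new_msgid new_msgstr : List String) (xs : List String) :
    List (List String) × List String :=
  xs.reverse.foldl (pvStepB new_msgid new_msgstr) ([], [])

-- what B finally renders out of a state
def pvRender (st : List (List String) × List String) : List String :=
  st.2.reverse ++ st.1.reverse.flatten

-- what B renders when the pending buffer will be discarded (a header precedes xs)
def pvRenderD (st : List (List String) × List String) : List String :=
  st.1.reverse.flatten

theorem pvBS_cons (ni ns : List String) (l : String) (rest : List String) :
    pvBS ni ns (l :: rest) = pvStepB ni ns (pvBS ni ns rest) l := by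
  simp [pvBS, List.reverse_cons, List.foldl_append]

-- a line starting with "msgid" or "msgstr" does not start with a double quote
theorem pv_not_quote_of_msg (l : String) (t : List Char)
    (h : PySem.Str.startswith l (String.ofList ('m' :: t)) = true) :
    PySem.Str.startswith l "\"" = false := by
  simp only [PySem.Str.startswith_eq] at h ⊢
  rw [PySem.Chars.startswith_iff] at h
  rw [← Bool.not_eq_true, PySem.Chars.startswith_iff]
  obtain ⟨u, hu⟩ := h
  intro hq
  obtain ⟨v, hv⟩ := hq
  rw [← hu] at hv
  simp at hv

-- main invariant: from any accumulator, A's forward state-machine pass equals the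
-- accumulator followed by the rendering of B's right-to-left state; a live header
-- mode on A's side corresponds to B's pending buffer being discarded.
theorem pv_key (ni ns : List String) : ∀ (xs : List String) (res : List String),
    pvLoopA ni ns xs res none = res ++ pvRender (pvBS ni ns xs) ∧
    ∀ m, (m = "msgid" ∨ m = "msgstr") →
      pvLoopA ni ns xs res (some m) = res ++ pvRenderD (pvBS ni ns xs) := by
  intro xs
  induction xs with
  | nil =>
    intro res
    refine ⟨?_, fun m _ => ?_⟩ <;> simp [pvLoopA, pvBS, pvRender, pvRenderD]
  | cons l rest ih =>
    intro res
    rw [pvBS_cons]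
    by_cases h1 : PySem.Str.startswith l "msgid" = true
    · have hnq : PySem.Str.startswith l "\"" = false := pv_not_quote_of_msg l _ h1
      have h1c : PySem.Chars.startswith l.toList ['m','s','g','i','d'] = true := by
        simp only [PySem.Str.startswith_eq] at h1; simpa using h1
      have hqc : PySem.Chars.startswith l.toList ['\"'] = false := by
        simp only [PySem.Str.startswith_eq] at hnq; simpa using hnq
      have hst : pvStepB ni ns (pvBS ni ns rest) l = ((pvBS ni ns rest).1 ++ [ni], []) := by
        simp [pvStepB, h1c, hqc]
      rw [hst]
      have hid : ∀ r : List String, pvLoopA ni ns rest r (some "msgid")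
          = r ++ pvRenderD (pvBS ni ns rest) := fun r => (ih r).2 "msgid" (Or.inl rfl)
      constructor
      · rw [pvLoopA, if_pos h1, hid]
        simp [pvRender, pvRenderD]
      · intro m hm
        rw [pvLoopA, if_pos h1, hid]
        simp [pvRenderD]
    · by_cases h2 : PySem.Str.startswith l "msgstr" = true
      · have hnq : PySem.Str.startswith l "\"" = false := pv_not_quote_of_msg l _ h2
        have h1c : PySem.Chars.startswith l.toList ['m','s','g','i','d'] = false := by
          simp only [PySem.Str.startswith_eq] at h1; simpa using h1
        have h2c : PySem.Chars.startswith l.toList ['m','s','g','s','t','r'] = true := by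
          simp only [PySem.Str.startswith_eq] at h2; simpa using h2
        have hqc : PySem.Chars.startswith l.toList ['\"'] = false := by
          simp only [PySem.Str.startswith_eq] at hnq; simpa using hnq
        have hst : pvStepB ni ns (pvBS ni ns rest) l = ((pvBS ni ns rest).1 ++ [ns], []) := by
          simp [pvStepB, h1c, h2c, hqc]
        rw [hst]
        have hid : ∀ r : List String, pvLoopA ni ns rest r (some "msgstr")
            = r ++ pvRenderD (pvBS ni ns rest) := fun r => (ih r).2 "msgstr" (Or.inr rfl)
        constructor
        · rw [pvLoopA, if_neg h1, if_pos h2, hid]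
          simp [pvRender, pvRenderD]
        · intro m hm
          rw [pvLoopA, if_neg h1, if_pos h2, hid]
          simp [pvRenderD]
      · by_cases hq : PySem.Str.startswith l "\"" = true
        · have hst : pvStepB ni ns (pvBS ni ns rest) l
              = ((pvBS ni ns rest).1, (pvBS ni ns rest).2 ++ [l]) := by
            have hqc : PySem.Chars.startswith l.toList ['\"'] = true := by
              simp only [PySem.Str.startswith_eq] at hq; simpa using hq
            simp [pvStepB, hqc]
          rw [hst]
          constructor
          · have hnc : ¬ (((none : Option String) = some "msgid" ∨
                (none : Option String) = some "msgstr") ∧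
                PySem.Str.startswith l "\"" = true) := by simp
            rw [pvLoopA, if_neg h1, if_neg h2, if_neg hnc, (ih (res ++ [l])).1]
            simp [pvRender]
          · intro m hm
            have hc : (some m = some "msgid" ∨ some m = some "msgstr") ∧
                PySem.Str.startswith l "\"" = true := by
              refine ⟨?_, hq⟩
              rcases hm with hm | hm
              · exact Or.inl (by rw [hm])
              · exact Or.inr (by rw [hm])
            rw [pvLoopA, if_neg h1, if_neg h2, if_pos hc, (ih res).2 m hm]
            simp [pvRenderD]
        · have hst : pvStepB ni ns (pvBS ni ns rest) l
              = ((pvBS ni ns rest).1 ++ [((pvBS ni ns rest).2 ++ [l]).reverse], []) := by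
            have h1c : PySem.Chars.startswith l.toList ['m','s','g','i','d'] = false := by
              simp only [PySem.Str.startswith_eq] at h1; simpa using h1
            have h2c : PySem.Chars.startswith l.toList ['m','s','g','s','t','r'] = false := by
              simp only [PySem.Str.startswith_eq] at h2; simpa using h2
            have hqc : PySem.Chars.startswith l.toList ['\"'] = false := by
              simp only [PySem.Str.startswith_eq] at hq; simpa using hq
            simp [pvStepB, h1c, h2c, hqc]
          rw [hst]
          constructor
          · rw [pvLoopA, if_neg h1, if_neg h2, if_neg (fun h => hq h.2),
              (ih (res ++ [l])).1]
            simp [pvRender]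
          · intro m hm
            rw [pvLoopA, if_neg h1, if_neg h2, if_neg (fun h => hq h.2),
              (ih (res ++ [l])).1]
            simp [pvRender, pvRenderD]

-- ===== VERDICT (by name: the statement is the Claim_ definition above) =====
theorem replace_msgid_msgstr_spec : Claim_equal_replace_msgid_msgstr := by
  intro e ni ns _
  unfold Spec_replace_msgid_msgstr replace_msgid_msgstr replace_msgid_msgstr_alt
  rw [(pv_key ni ns e []).1]
  show pvRender (pvBS ni ns e) = _
  simp [pvRender, pvBS]
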